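-- pv_equiv track=rewrite | github.com/zy8848/abnf-extractor | categroy/category.py | is_complete_ruleset
-- ===== SOURCE A (Python) =====
-- def is_complete_ruleset(rulenames_2d):
--
--     left_part = []
--     right_part = []
--     for rulenames in rulenames_2d:
--
--         left_part.append(rulenames[0])
--         right_part.extend(rulenames[1:])
--
--     left_set = set(left_part)
--     right_set = set(right_part)
--
--     result = right_set.issubset(left_set)
--
--     invalid_names = right_set - left_set
--     return result,invalid_names
-- ===== SOURCE B (Python) =====
-- def is_complete_ruleset(rulenames_2d):
--     # Online single pass: resolve references incrementally against the
--     # definitions seen so far, discarding pending references once defined.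
--     defined = set()
--     pending = set()
--     for row in rulenames_2d:
--         defined.add(row[0])
--         pending.discard(row[0])
--         for name in row[1:]:
--             if name not in defined:
--                 pending.add(name)
--     return not pending, pending
-- ===== Notes on version B (the rewrite author's own statement) =====
-- stated objective: alternative
-- what changed: B is an online single pass that resolves references as definitions arrive (maintaining a 'defined' set and a 'pending' set of not-yet-defined references, discarding a pending name when its definition appears), instead of A's staged collect-everything-then-set-algebra (left/right lists, issubset, set difference).
import Mathlib
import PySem

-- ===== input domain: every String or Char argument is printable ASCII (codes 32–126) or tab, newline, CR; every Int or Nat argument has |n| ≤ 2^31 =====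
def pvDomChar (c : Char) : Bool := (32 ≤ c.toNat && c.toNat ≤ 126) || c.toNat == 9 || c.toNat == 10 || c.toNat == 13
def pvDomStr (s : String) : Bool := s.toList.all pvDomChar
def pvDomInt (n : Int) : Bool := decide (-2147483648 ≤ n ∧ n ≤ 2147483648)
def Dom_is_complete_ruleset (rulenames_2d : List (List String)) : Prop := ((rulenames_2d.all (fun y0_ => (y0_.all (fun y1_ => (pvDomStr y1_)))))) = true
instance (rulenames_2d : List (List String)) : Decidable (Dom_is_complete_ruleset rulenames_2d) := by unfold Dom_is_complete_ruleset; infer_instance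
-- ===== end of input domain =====

-- B is an online single pass: it resolves references incrementally against the
-- definitions seen so far (a 'defined' set and a 'pending' set of not-yet-defined
-- references, discarding a pending name when its definition appears), instead of
-- A's collect-everything-then-set-algebra. Return value only; nothing is mutated.

-- ===== PORT A =====
def is_complete_ruleset (rulenames_2d : List (List String)) : Bool × List String :=
  -- for rulenames in rulenames_2d: left_part.append(rulenames[0]); right_part.extend(rulenames[1:])
  -- rulenames[0] is total here only under Pre_ (nonempty rows); pyGetD is its total form
  let parts := rulenames_2d.foldl
    (fun (st : List String × List String) rulenames =>
      (st.1 ++ [PySem.List.pyGetD rulenames 0 ""],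
       st.2 ++ PySem.List.slice rulenames (some 1) none)) ([], [])
  let left_set : PySem.Set String := PySem.Set.ofList parts.1
  let right_set : PySem.Set String := PySem.Set.ofList parts.2
  let result := PySem.Set.issubset right_set left_set
  let invalid_names := PySem.Set.diff right_set left_set
  (result, invalid_names)

-- ===== PORT B =====
def is_complete_ruleset_alt (rulenames_2d : List (List String)) : Bool × List String :=
  -- defined = set(); pending = set()
  -- for row: defined.add(row[0]); pending.discard(row[0]);
  --          for name in row[1:]: if name not in defined: pending.add(name)
  let st := rulenames_2d.foldl
    (fun (st : PySem.Set String × PySem.Set String) row =>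
      let d := PySem.Set.add st.1 (PySem.List.pyGetD row 0 "")
      let p := PySem.Set.discard st.2 (PySem.List.pyGetD row 0 "")
      let p := (PySem.List.slice row (some 1) none).foldl
        (fun p name => if PySem.Set.contains d name then p else PySem.Set.add p name) p
      (d, p))
    (PySem.Set.empty, PySem.Set.empty)
  (st.2.isEmpty, st.2)

-- ===== PRECONDITION & SPEC =====
-- Pre_ excludes inputs containing an empty row: there both Pythons raise IndexError on row[0].
def Pre_is_complete_ruleset (rulenames_2d : List (List String)) : Prop :=
  ∀ row ∈ rulenames_2d, row ≠ []
instance (rulenames_2d : List (List String)) : Decidable (Pre_is_complete_ruleset rulenames_2d) := by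
  unfold Pre_is_complete_ruleset; infer_instance
def pvWitness_is_complete_ruleset : List (List String) := [["a", "b"], ["b"]]
def Spec_is_complete_ruleset (rulenames_2d : List (List String)) (out : Bool × List String) : Prop := out = is_complete_ruleset_alt rulenames_2d
instance (rulenames_2d : List (List String)) (out : Bool × List String) : Decidable (Spec_is_complete_ruleset rulenames_2d out) := by unfold Spec_is_complete_ruleset; infer_instance

-- ===== CLAIM (what is proved, stated in full; the proofs are below) =====
def Claim_equal_is_complete_ruleset : Prop := ∀ (rulenames_2d : List (List String)), Dom_is_complete_ruleset rulenames_2d → Pre_is_complete_ruleset rulenames_2d → Spec_is_complete_ruleset rulenames_2d (is_complete_ruleset rulenames_2d)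

-- ===== LEMMAS AND PROOFS =====

-- A's single loop builds exactly (map of heads, flatMap of tails).
theorem foldA_eq (l : List (List String)) (a b : List String) :
    l.foldl (fun (st : List String × List String) rulenames =>
      (st.1 ++ [PySem.List.pyGetD rulenames 0 ""],
       st.2 ++ PySem.List.slice rulenames (some 1) none)) (a, b)
    = (a ++ l.map (fun row => PySem.List.pyGetD row 0 ""),
       b ++ l.flatMap (fun row => PySem.List.slice row (some 1) none)) := by
  induction l generalizing a b with
  | nil => simp
  | cons x xs ih => simp [List.foldl_cons, ih]

-- membership of a set built from H ++ [h]
theorem contains_ofList_append_singleton (H : List String) (h x : String) :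
    (PySem.Set.ofList (H ++ [h])).contains x
    = ((PySem.Set.ofList H).contains x || x == h) := by
  rw [PySem.Set.ofList_append_singleton, PySem.Set.add_eq_ite]
  by_cases hm : h ∈ PySem.Set.ofList H
  · simp only [hm, if_pos]
    by_cases hx : x = h
    · subst hx; simp [hm, List.contains_eq_mem]
    · simp [hx]
  · simp only [hm]
    by_cases hx : x = h <;> simp [hx]

-- B's inner loop extends the pending set by exactly the new undefined names.
theorem inner_fold (d : PySem.Set String) (t T : List String) :
    t.foldl (fun p name => if PySem.Set.contains d name then p else PySem.Set.add p name)
      ((PySem.Set.ofList T).filter (fun x => !(PySem.Set.contains d x)))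
    = (PySem.Set.ofList (T ++ t)).filter (fun x => !(PySem.Set.contains d x)) := by
  induction t generalizing T with
  | nil => simp
  | cons n rest ih =>
    have step : (if PySem.Set.contains d n
          then (PySem.Set.ofList T).filter (fun x => !(PySem.Set.contains d x))
          else PySem.Set.add ((PySem.Set.ofList T).filter (fun x => !(PySem.Set.contains d x))) n)
        = (PySem.Set.ofList (T ++ [n])).filter (fun x => !(PySem.Set.contains d x)) := by
      rw [PySem.Set.ofList_append_singleton, PySem.Set.add_eq_ite]
      by_cases hc : PySem.Set.contains d n = true
      · have hd : n ∈ d := by simpa using hc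
        by_cases hm : n ∈ PySem.Set.ofList T
        · simp [hm, hd]
        · simp [hm, hd, List.filter_append]
      · have hcb : PySem.Set.contains d n = false := by
          cases hv : PySem.Set.contains d n; rfl; exact absurd hv hc
        have hd : n ∉ d := by simpa using hcb
        by_cases hm : n ∈ PySem.Set.ofList T
        · simp [hm, hd]
        · have hp : n ∉ (PySem.Set.ofList T).filter (fun x => !(PySem.Set.contains d x)) :=
            fun h => hm (List.mem_filter.mp h).1
          simp [hm, hd, List.filter_append]
    rw [List.foldl_cons, step]
    have : T ++ n :: rest = (T ++ [n]) ++ rest := by simp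
    rw [this, ← ih (T ++ [n])]

-- the loop invariant of B's outer pass: defined = heads seen, pending = tails seen minus defined
theorem outer_fold (l : List (List String)) (H T : List String) :
    l.foldl
      (fun (st : PySem.Set String × PySem.Set String) row =>
        let d := PySem.Set.add st.1 (PySem.List.pyGetD row 0 "")
        let p := PySem.Set.discard st.2 (PySem.List.pyGetD row 0 "")
        let p := (PySem.List.slice row (some 1) none).foldl
          (fun p name => if PySem.Set.contains d name then p else PySem.Set.add p name) p
        (d, p))
      (PySem.Set.ofList H,
       (PySem.Set.ofList T).filter (fun x => !((PySem.Set.ofList H).contains x)))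
    = (PySem.Set.ofList (H ++ l.map (fun row => PySem.List.pyGetD row 0 "")),
       (PySem.Set.ofList (T ++ l.flatMap (fun row => PySem.List.slice row (some 1) none))).filter
         (fun x => !((PySem.Set.ofList
            (H ++ l.map (fun row => PySem.List.pyGetD row 0 ""))).contains x))) := by
  induction l generalizing H T with
  | nil => simp
  | cons row rest ih =>
    rw [List.foldl_cons]
    have hd' : PySem.Set.add (PySem.Set.ofList H) (PySem.List.pyGetD row 0 "")
        = PySem.Set.ofList (H ++ [PySem.List.pyGetD row 0 ""]) :=
      (PySem.Set.ofList_append_singleton ..).symm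
    have hp' : PySem.Set.discard
          ((PySem.Set.ofList T).filter (fun x => !((PySem.Set.ofList H).contains x)))
          (PySem.List.pyGetD row 0 "")
        = (PySem.Set.ofList T).filter
            (fun x => !((PySem.Set.ofList (H ++ [PySem.List.pyGetD row 0 ""])).contains x)) := by
      show List.filter _ (List.filter _ _) = _
      rw [List.filter_filter]
      apply List.filter_congr
      intro x _
      rw [contains_ofList_append_singleton]
      cases hv : (PySem.Set.ofList H).contains x <;> cases hw : (x == PySem.List.pyGetD row 0 "") <;> simp
    dsimp only
    rw [hd', hp', inner_fold,
      ih (H ++ [PySem.List.pyGetD row 0 ""]) (T ++ PySem.List.slice row (some 1) none)]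
    simp [List.append_assoc]

-- definitional spellings of the two set operations A uses
theorem diff_eq_filter (s t : PySem.Set String) :
    PySem.Set.diff s t = s.filter (fun y => !(PySem.Set.contains t y)) := rfl

theorem issubset_eq_all (s t : PySem.Set String) :
    PySem.Set.issubset s t = s.all (fun y => PySem.Set.contains t y) := rfl

-- all q = isEmpty of the ¬q-filtered list
theorem all_eq_isEmpty_filter (q : String → Bool) (l : List String) :
    l.all q = (l.filter (fun y => !(q y))).isEmpty := by
  induction l with
  | nil => rfl
  | cons x xs ih => cases hq : q x <;> simp [hq, ih]

-- ===== VERDICT (by name: the statement is the Claim_ definition above) =====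
theorem is_complete_ruleset_spec : Claim_equal_is_complete_ruleset := by
  intro l _ _
  unfold Spec_is_complete_ruleset is_complete_ruleset is_complete_ruleset_alt
  dsimp only
  rw [foldA_eq]
  have h0 : (PySem.Set.empty (α := String),
      PySem.Set.empty (α := String))
      = (PySem.Set.ofList ([] : List String),
         (PySem.Set.ofList ([] : List String)).filter
           (fun x => !((PySem.Set.ofList ([] : List String)).contains x))) := rfl
  rw [h0, outer_fold]
  simp only [List.nil_append]
  rw [diff_eq_filter, issubset_eq_all, all_eq_isEmpty_filter]
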